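-- pv_equiv track=rewrite | github.com/Jason-Adam/grokking-algorithms | ta/ivan_velazquez/TestAlgorithm_Week8.py | Schedule_Guards
-- ===== SOURCE A (Python) =====
-- Over_Time_Threshold = 8
--
-- def Schedule_Guards(graph, Hours_Needed):
--     overtime_guards = []
--     while (
--         Hours_Needed > 0
--     ):  # Here we check the completion condition. If we still have hours to schedule then
--         for key, value in graph.items():  # For our guards in our roster
--             while (
--                 value < Over_Time_Threshold and Hours_Needed > 0
--             ):  # If they have regular hours left to work and if we need to schedule more hours
--                 value = value + 1  # Update our value to track our hours
--                 new_dict_value = {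
--                     key: value
--                 }  # variable to hold our updated dictionary value
--                 graph.update(new_dict_value)  # Update the hours worked by the guard
--                 Hours_Needed = Hours_Needed - 1  # Update our remaining scheduled ours
--             else:
--                 if value >= 8:
--                     overtime_guards.append(
--                         key
--                     )  # Add guard to our lis tof guards who have hit overtime
--     else:  # If we have met the condition we return our schedule
--         return graph
-- ===== SOURCE B (Python) =====
-- Over_Time_Threshold = 8
--
-- def Schedule_Guards(graph, Hours_Needed):
--     remaining = Hours_Needed
--     for key, value in list(graph.items()):
--         add = min(Over_Time_Threshold - value, remaining)
--         if add > 0: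
--             graph[key] = value + add
--             remaining -= add
--     return graph
-- ===== Notes on version B (the rewrite author's own statement) =====
-- stated objective: simpler
-- what changed: Replaces the nested while loops that schedule one hour per dict update with a single pass over the guards computing add = min(8 - value, remaining) arithmetically, dropping the unused overtime_guards bookkeeping; B also returns (with the dict fully topped up) where A loops forever because Hours_Needed exceeds capacity.
import Mathlib
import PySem

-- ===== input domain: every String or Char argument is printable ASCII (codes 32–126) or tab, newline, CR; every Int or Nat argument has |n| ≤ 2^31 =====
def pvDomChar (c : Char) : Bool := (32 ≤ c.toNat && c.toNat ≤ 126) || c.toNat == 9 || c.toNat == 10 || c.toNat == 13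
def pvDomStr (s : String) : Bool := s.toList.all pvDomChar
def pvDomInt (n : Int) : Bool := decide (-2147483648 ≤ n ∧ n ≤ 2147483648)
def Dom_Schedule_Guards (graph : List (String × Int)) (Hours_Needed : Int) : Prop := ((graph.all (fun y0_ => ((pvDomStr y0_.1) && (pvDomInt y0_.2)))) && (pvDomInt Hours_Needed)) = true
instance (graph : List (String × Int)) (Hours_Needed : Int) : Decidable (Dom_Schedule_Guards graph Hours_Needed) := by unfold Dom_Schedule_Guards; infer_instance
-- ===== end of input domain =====

-- B replaces A's nested while loops (one dict update per scheduled hour) with a single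
-- arithmetic min() pass per guard (objective: simpler); both A and B mutate the caller's dict
-- in place and return it — the equivalence proved here is about the return value.

-- ===== PORT A =====
-- inner 'while value < Over_Time_Threshold and Hours_Needed > 0' loop; state (graph, Hours_Needed, value)
def pvInnerA (key : String) (value : Int) (hours : Int) (g : PySem.Dict String Int) :
    PySem.Dict String Int × Int × Int :=
  if value < 8 ∧ hours > 0 then
    pvInnerA key (value + 1) (hours - 1) (g.insert key (value + 1))
  else (g, hours, value)
termination_by hours.toNat
decreasing_by omega

-- 'for key, value in graph.items()' loop (iterating the snapshot taken when the for starts)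
def pvForA : List (String × Int) → PySem.Dict String Int → Int → List String →
    PySem.Dict String Int × Int × List String
  | [], g, hours, ov => (g, hours, ov)
  | (k, v) :: rest, g, hours, ov =>
    let r := pvInnerA k v hours g
    pvForA rest r.1 r.2.1 (if r.2.2 ≥ 8 then ov ++ [k] else ov)

-- outer 'while Hours_Needed > 0' loop, with fuel to make it total (Python loops forever when
-- Hours_Needed exceeds the total capacity; those inputs are excluded by Pre_ below)
def pvOuterA : Nat → PySem.Dict String Int → Int → List String → PySem.Dict String Int
  | 0, g, _, _ => g
  | fuel + 1, g, hours, ov =>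
    if hours > 0 then
      let r := pvForA g.items g hours ov
      pvOuterA fuel r.1 r.2.1 r.2.2
    else g

def Schedule_Guards (graph : List (String × Int)) (Hours_Needed : Int) : List (String × Int) :=
  (pvOuterA (Hours_Needed.toNat + 1) (PySem.Dict.mk graph) Hours_Needed []).items

-- ===== PORT B =====
def Schedule_Guards_alt (graph : List (String × Int)) (Hours_Needed : Int) : List (String × Int) :=
  (graph.foldl
    (fun (acc : PySem.Dict String Int × Int) kv =>
      let add := min (8 - kv.2) acc.2
      if add > 0 then (acc.1.insert kv.1 (kv.2 + add), acc.2 - add) else acc)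
    (PySem.Dict.mk graph, Hours_Needed)).1.items

-- ===== PRECONDITION & SPEC =====
-- Pre_ excludes (a) inputs where Hours_Needed exceeds the guards' total remaining regular-hours
-- capacity: there Python A never returns (its outer while loops forever); and (b) association
-- lists with duplicate keys, which cannot occur as a Python dict.
def Pre_Schedule_Guards (graph : List (String × Int)) (Hours_Needed : Int) : Prop :=
  Hours_Needed ≤ (graph.map (fun kv => max 0 (8 - kv.2))).sum ∧ (graph.map Prod.fst).Nodup
instance (graph : List (String × Int)) (Hours_Needed : Int) : Decidable (Pre_Schedule_Guards graph Hours_Needed) := by unfold Pre_Schedule_Guards; infer_instance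

def pvWitness_Schedule_Guards : (List (String × Int)) × Int := ([("ana", 3), ("bob", 9)], 4)

def Spec_Schedule_Guards (graph : List (String × Int)) (Hours_Needed : Int) (out : List (String × Int)) : Prop := out = Schedule_Guards_alt graph Hours_Needed
instance (graph : List (String × Int)) (Hours_Needed : Int) (out : List (String × Int)) : Decidable (Spec_Schedule_Guards graph Hours_Needed out) := by unfold Spec_Schedule_Guards; infer_instance

-- ===== CLAIM (what is proved, stated in full; the proofs are below) =====
def Claim_equal_Schedule_Guards : Prop := ∀ (graph : List (String × Int)) (Hours_Needed : Int), Dom_Schedule_Guards graph Hours_Needed → Pre_Schedule_Guards graph Hours_Needed → Spec_Schedule_Guards graph Hours_Needed (Schedule_Guards graph Hours_Needed)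

-- ===== LEMMAS AND PROOFS =====

-- B's fold step, named for the lemmas
def pvStepB (acc : PySem.Dict String Int × Int) (kv : String × Int) : PySem.Dict String Int × Int :=
  let add := min (8 - kv.2) acc.2
  if add > 0 then (acc.1.insert kv.1 (kv.2 + add), acc.2 - add) else acc

theorem alt_eq (graph : List (String × Int)) (h : Int) :
    Schedule_Guards_alt graph h = (graph.foldl pvStepB (PySem.Dict.mk graph, h)).1.items := rfl

theorem inner_spec (key : String) (value hours : Int) (g : PySem.Dict String Int) :
    pvInnerA key value hours g =
      if 0 < min (8 - value) hours then
        (g.insert key (value + min (8 - value) hours), hours - min (8 - value) hours,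
          value + min (8 - value) hours)
      else (g, hours, value) := by
  fun_induction pvInnerA key value hours g with
  | case1 value hours g hc ih =>
    rcases hc with ⟨hv, hh⟩
    rw [ih]
    by_cases ht : 0 < min (8 - (value + 1)) (hours - 1)
    · rw [if_pos ht, if_pos (by omega), PySem.Dict.insert_insert_self]
      have h1 : min (8 - (value + 1)) (hours - 1) = min (8 - value) hours - 1 := by omega
      rw [h1]
      simp only [Prod.mk.injEq]
      refine ⟨by congr 1; omega, by omega, by omega⟩
    · rw [if_neg ht, if_pos (by omega)]
      have h1 : min (8 - value) hours = 1 := by omega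
      rw [h1]
  | case2 value hours g hc =>
    rw [if_neg (by omega)]

theorem for_eq_fold (l : List (String × Int)) (g : PySem.Dict String Int) (hours : Int)
    (ov : List String) :
    ((pvForA l g hours ov).1, (pvForA l g hours ov).2.1) = l.foldl pvStepB (g, hours) := by
  induction l generalizing g hours ov with
  | nil => simp [pvForA]
  | cons kv rest ih =>
    obtain ⟨k, v⟩ := kv
    simp only [pvForA, List.foldl_cons, inner_spec, pvStepB]
    by_cases ht : 0 < min (8 - v) hours
    · simp only [if_pos ht, ih]
    · simp only [if_neg ht, ih]

theorem cap_nonneg (l : List (String × Int)) :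
    0 ≤ (l.map (fun kv => max 0 (8 - kv.2))).sum := by
  apply List.sum_nonneg
  intro x hx
  simp only [List.mem_map] at hx
  obtain ⟨kv, _, rfl⟩ := hx
  omega

theorem fold_snd (l : List (String × Int)) (g : PySem.Dict String Int) (hours : Int)
    (hh : 0 ≤ hours) :
    (l.foldl pvStepB (g, hours)).2 = max 0 (hours - (l.map (fun kv => max 0 (8 - kv.2))).sum) := by
  induction l generalizing g hours with
  | nil => simp; omega
  | cons kv rest ih =>
    have hcap := cap_nonneg rest
    simp only [List.foldl_cons, List.map_cons, List.sum_cons, pvStepB]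
    by_cases ht : 0 < min (8 - kv.2) hours
    · rw [if_pos ht, ih _ _ (by omega)]
      omega
    · rw [if_neg ht, ih _ _ hh]
      omega

theorem fold_nonpos (l : List (String × Int)) (g : PySem.Dict String Int) (hours : Int)
    (hh : hours ≤ 0) : l.foldl pvStepB (g, hours) = (g, hours) := by
  induction l generalizing g with
  | nil => rfl
  | cons kv rest ih =>
    simp only [List.foldl_cons, pvStepB]
    rw [if_neg (by omega), ih]

-- ===== VERDICT (by name: the statement is the Claim_ definition above) =====
theorem Schedule_Guards_spec : Claim_equal_Schedule_Guards := by
  intro graph h _ hpre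
  unfold Spec_Schedule_Guards
  rw [alt_eq]
  unfold Schedule_Guards
  obtain ⟨hcap, -⟩ := hpre
  by_cases hpos : h > 0
  · have hn : ∃ n, h.toNat = n + 1 := ⟨h.toNat - 1, by omega⟩
    obtain ⟨n, hn⟩ := hn
    rw [hn]
    show (pvOuterA (n + 1 + 1) (PySem.Dict.mk graph) h []).items = _
    rw [pvOuterA, if_pos hpos]
    have hfe := for_eq_fold graph (PySem.Dict.mk graph) h []
    set r := pvForA graph (PySem.Dict.mk graph) h [] with hr
    have h1 : r.1 = (graph.foldl pvStepB (PySem.Dict.mk graph, h)).1 := by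
      rw [← hfe]
    have h2 : r.2.1 = (graph.foldl pvStepB (PySem.Dict.mk graph, h)).2 := by
      rw [← hfe]
    have hz : r.2.1 = 0 := by
      rw [h2, fold_snd _ _ _ (by omega)]
      omega
    show (pvOuterA (n + 1) r.1 r.2.1 r.2.2).items = _
    rw [hz, pvOuterA, if_neg (by omega), h1]
  · have hn : h.toNat = 0 := by omega
    rw [hn]
    show (pvOuterA 1 (PySem.Dict.mk graph) h []).items = _
    rw [pvOuterA, if_neg hpos, fold_nonpos _ _ _ (by omega)]
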